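-- pv_equiv track=rewrite | github.com/Thitouane/Puissance4 | Puissance4/connect4.py | lc_diagonalesv1
-- ===== SOURCE A (Python) =====
-- def nr(g):
--     '''Renvoie le nombres de lignes de la grille g
--        :param g:(list) une liste qui représente la grille
--        :return:(int) le nombre de lignes trouvé dans cette grille
--        CU:g une grille valide
--        Exemples:
--
--        >>> nr([[0, 0, 0, 0, 0, 0, 0], [0, 0, 0, 0, 0, 0, 0], [0, 0, 0, 0, 0, 0, 0], [0, 0, 0, 0, 0, 0, 0], [0, 0, 0, 0, 0, 0, 0], [0, 0, 0, 0, 0, 0, 0]])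
--        6
--        >>> nr([[0, 0, 0, 0], [0, 0, 0, 0], [0, 0, 0, 0]])
--        3
--     '''
--     return len(g)
--
-- def nc(g):
--     '''Renvoie le nombres de colonnes de la grille g
--        :param g:(list) une liste qui représente la grille
--        :return:(int) le nombre de colonne trouvé dans cette grille
--        CU:g une grille valide
--        Exemples:
--
--        >>> nc([[0, 0, 0, 0, 0, 0, 0], [0, 0, 0, 0, 0, 0, 0], [0, 0, 0, 0, 0, 0, 0], [0, 0, 0, 0, 0, 0, 0], [0, 0, 0, 0, 0, 0, 0], [0, 0, 0, 0, 0, 0, 0]])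
--        7
--        >>> nc([[0, 0, 0, 0], [0, 0, 0, 0], [0, 0, 0, 0]])
--        4
--     '''
--     return len(g[0])
--
-- def lc_diagonalesv1(g,r,c):
--     '''Construit et renvoie la liste des coordonnées des cases avec la valeur de la case pour la première diagonale
--        :param g:(list) une liste qui représente la grille
--        :param c:(int) coordonnée de la colonne testé
--        :param r:(int) coordonnée de la ligne testé
--        :retrun:(list) la liste des coordonnées des cases
--        CU: c une colonne de g et r une ligne de g
--        >>> lc_diagonalesv1(initialise(6,7),0,5)
--        [(0, 5), (1, 6)]
--        >>> lc_diagonalesv1(initialise(6,7),3,3)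
--        [(0, 0), (1, 1), (2, 2), (3, 3), (4, 4), (5, 5)]
--     '''
--     lc=[]
--     for j in range (-3,4):
--         x = r + j
--         y = c + j
--         if x>=0 and x<nr(g) and y >=0 and y<nc(g):
--             lc.append((x,y))
--     return lc
-- ===== SOURCE B (Python) =====
-- def lc_diagonalesv1(g, r, c):
--     # Closed-form offset interval instead of scanning j in range(-3, 4).
--     jlo = max(-3, -r)
--     jhi = min(3, len(g) - 1 - r)
--     if jlo > jhi:
--         return []
--     # here len(g) >= 1, so g[0] exists
--     jlo = max(jlo, -c)
--     jhi = min(jhi, len(g[0]) - 1 - c)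
--     return [(r + j, c + j) for j in range(jlo, jhi + 1)]
-- ===== Notes on version B (the rewrite author's own statement) =====
-- stated objective: simpler
-- what changed: B computes the valid offset interval [jlo, jhi] in closed form with max/min bounds and emits it with one range, instead of scanning all seven offsets -3..3 and testing each against the grid bounds.
import Mathlib
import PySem

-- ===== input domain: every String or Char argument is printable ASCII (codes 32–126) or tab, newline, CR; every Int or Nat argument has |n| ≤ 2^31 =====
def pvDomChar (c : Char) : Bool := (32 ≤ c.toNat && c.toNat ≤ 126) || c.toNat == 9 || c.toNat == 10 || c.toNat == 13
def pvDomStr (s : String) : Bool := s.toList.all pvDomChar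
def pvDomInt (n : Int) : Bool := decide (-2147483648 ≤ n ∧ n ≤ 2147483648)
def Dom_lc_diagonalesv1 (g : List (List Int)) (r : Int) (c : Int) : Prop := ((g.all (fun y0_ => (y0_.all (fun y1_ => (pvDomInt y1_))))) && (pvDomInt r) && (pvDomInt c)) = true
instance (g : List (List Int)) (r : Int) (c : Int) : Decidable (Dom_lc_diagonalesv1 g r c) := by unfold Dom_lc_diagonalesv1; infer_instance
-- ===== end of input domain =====

-- B replaces A's scan over the seven offsets -3..3 with a closed-form valid-offset interval (simpler).

-- ===== PORT A =====
-- nr(g) = len(g)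
def pvNr (g : List (List Int)) : Int := g.length
-- nc(g) = len(g[0]); Python would raise on g = [], but A only evaluates nc(g) after
-- 'x < nr(g)' has held (short-circuit 'and'), i.e. when g is nonempty, so headD's
-- default [] is never observable; exact on every input A returns on (all of them).
def pvNc (g : List (List Int)) : Int := (g.headD []).length

def lc_diagonalesv1 (g : List (List Int)) (r : Int) (c : Int) : List (Int × Int) :=
  (PySem.List.pyRange (-3) 4 1).foldl
    (fun lc j =>
      let x := r + j
      let y := c + j
      if 0 ≤ x ∧ x < pvNr g ∧ 0 ≤ y ∧ y < pvNc g then lc ++ [(x, y)] else lc) []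

-- ===== PORT B =====
-- g[0] in Source B is reached only when jlo ≤ jhi, which forces len(g) ≥ 1; headD's default is unreachable.
def lc_diagonalesv1_alt (g : List (List Int)) (r : Int) (c : Int) : List (Int × Int) :=
  let jlo := max (-3) (-r)
  let jhi := min 3 ((g.length : Int) - 1 - r)
  if jlo > jhi then []
  else
    let jlo2 := max jlo (-c)
    let jhi2 := min jhi (((g.headD []).length : Int) - 1 - c)
    (PySem.List.pyRange jlo2 (jhi2 + 1) 1).map (fun j => (r + j, c + j))

-- ===== PRECONDITION & SPEC =====
def Spec_lc_diagonalesv1 (g : List (List Int)) (r : Int) (c : Int) (out : List (Int × Int)) : Prop := out = lc_diagonalesv1_alt g r c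
instance (g : List (List Int)) (r : Int) (c : Int) (out : List (Int × Int)) : Decidable (Spec_lc_diagonalesv1 g r c out) := by unfold Spec_lc_diagonalesv1; infer_instance

-- ===== CLAIM (what is proved, stated in full; the proofs are below) =====
def Claim_equal_lc_diagonalesv1 : Prop := ∀ (g : List (List Int)) (r : Int) (c : Int), Dom_lc_diagonalesv1 g r c → Spec_lc_diagonalesv1 g r c (lc_diagonalesv1 g r c)

-- ===== LEMMAS AND PROOFS =====

-- a sub-interval of -3..3 written as a pyRange equals the filtered full scan range
theorem pv_range_as_filter (lo hi : Int) (hlo : -3 ≤ lo) (hhi : hi ≤ 3) :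
    PySem.List.pyRange lo (hi + 1) 1
      = (PySem.List.pyRange (-3) 4 1).filter (fun j => decide (lo ≤ j ∧ j ≤ hi)) := by
  by_cases hle : lo ≤ hi
  · have h1 : lo ≤ 3 := le_trans hle hhi
    have h2 : -3 ≤ hi := le_trans hlo hle
    interval_cases lo <;> interval_cases hi <;> decide
  · rw [PySem.List.pyRange_one_eq_nil (by omega)]
    symm
    rw [List.filter_eq_nil_iff]
    intro j hj
    rw [PySem.List.mem_pyRange_one] at hj
    simp only [decide_eq_true_eq, not_and]
    omega

theorem pv_main (g : List (List Int)) (r c : Int) :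
    lc_diagonalesv1 g r c = lc_diagonalesv1_alt g r c := by
  unfold lc_diagonalesv1 lc_diagonalesv1_alt pvNr pvNc
  simp only []
  rw [PySem.List.foldl_append_ite]
  simp only [List.nil_append]
  set n : Int := (g.length : Int) with hn
  set m : Int := ((g.headD []).length : Int) with hm
  by_cases hgt : max (-3) (-r) > min 3 (n - 1 - r)
  · rw [if_pos hgt, List.filter_eq_nil_iff.2, List.map_nil]
    intro j hj
    rw [PySem.List.mem_pyRange_one] at hj
    simp only [decide_eq_true_eq, not_and]
    omega
  · rw [if_neg hgt,
      pv_range_as_filter (max (max (-3) (-r)) (-c))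
        (min (min 3 (n - 1 - r)) (m - 1 - c)) (by omega) (by omega)]
    congr 1
    apply List.filter_congr
    intro j hj
    rw [PySem.List.mem_pyRange_one] at hj
    simp only [decide_eq_decide]
    omega

-- ===== VERDICT (by name: the statement is the Claim_ definition above) =====
theorem lc_diagonalesv1_spec : Claim_equal_lc_diagonalesv1 := by
  intro g r c _
  unfold Spec_lc_diagonalesv1
  exact pv_main g r c
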